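-- pv_equiv track=rewrite | github.com/i960107/algorithm | programmers/2022_카카오_상반기_problem5.py | solution
-- ===== SOURCE A (Python) =====
-- from typing import List, Deque
-- from collections import deque
--
-- def solution(rc: List[List[int]], operations: List[str]) -> List[List[int]]:
--     row, column = len(rc), len(rc[0])
--     queue = deque(rc)
--
--     # 로테이트시 대상이 되는 원소들의 개수 가장 외각의 원소의 개숫
--     rotate_element_count = row * 2 + (column - 2) * 2
--
--     def shift_row():
--         queue.insert(0, queue.pop())
--
--     def rotate():
--         i, j = 0, 1
--         prev = queue[0][0]
--
--         count = rotate_element_count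
--         while count > 0:
--             temp = queue[i][j]
--             queue[i][j] = prev
--             prev = temp
--             if i == 0 and j < column - 1:
--                 j += 1
--             elif j == column - 1 and i < row - 1:
--                 i += 1
--             elif i == row - 1 and j > 0:
--                 j -= 1
--             else:
--                 i -= 1
--             count -=1
--
--     for op in operations:
--         if op == "Rotate":
--             rotate()
--         elif op == "ShiftRow":
--             shift_row()
--
--     return list(queue)
-- ===== SOURCE B (Python) =====
-- from typing import List
-- from collections import deque
--
--
-- def solution(rc: List[List[int]], operations: List[str]) -> List[List[int]]:
--     row, column = len(rc), len(rc[0])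
--     grid = deque(list(r) for r in rc)
--
--     # clockwise border coordinates, starting at the top-left corner
--     cells = ([(0, j) for j in range(column)]
--              + [(i, column - 1) for i in range(1, row)]
--              + [(row - 1, j) for j in range(column - 2, -1, -1)]
--              + [(i, 0) for i in range(row - 2, 0, -1)])
--
--     for op in operations:
--         if op == "Rotate":
--             vals = [grid[i][j] for i, j in cells]
--             vals = [vals[-1]] + vals[:-1]
--             for (i, j), v in zip(cells, vals):
--                 grid[i][j] = v
--         elif op == "ShiftRow":
--             grid.appendleft(grid.pop())
--
--     return list(grid)
-- ===== Notes on version B (the rewrite author's own statement) =====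
-- stated objective: alternative
-- what changed: A rotates the border by a stateful cell-by-cell walk (direction branches, threading a 'prev' value through 2R+2C-4 writes); B precomputes the clockwise border coordinate list once, and each Rotate extracts the border values, rotates that list by one, and scatter-writes it back with zip; B is pure with respect to rc while A mutates rc's rows in place (return values agree).
-- outside the precondition, e.g. on solution([[1, 2, 3]], ['Rotate']): A returns [[1, 3, 1]], B returns [[2, 3, 2]]
import Mathlib
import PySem

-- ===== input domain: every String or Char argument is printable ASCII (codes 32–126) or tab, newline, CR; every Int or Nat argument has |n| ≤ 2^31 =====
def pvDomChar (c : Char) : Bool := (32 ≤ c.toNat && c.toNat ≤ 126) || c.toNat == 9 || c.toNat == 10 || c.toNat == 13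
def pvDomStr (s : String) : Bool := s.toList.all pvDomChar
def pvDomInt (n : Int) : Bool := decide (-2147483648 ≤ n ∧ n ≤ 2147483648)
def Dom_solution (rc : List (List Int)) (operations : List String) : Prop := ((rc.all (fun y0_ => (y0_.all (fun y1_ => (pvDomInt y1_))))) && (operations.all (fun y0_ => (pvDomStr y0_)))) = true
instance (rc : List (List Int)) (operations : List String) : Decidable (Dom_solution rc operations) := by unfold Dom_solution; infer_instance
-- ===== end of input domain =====

-- B replaces A's stateful border walk (direction branches threading a 'prev' value through the
-- matrix) by: precompute the clockwise border coordinate list once, then each Rotate = read the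
-- border values, rotate that list by one, scatter-write it back with zip.  Objective: alternative.
-- Return values only: Python A mutates rc's inner rows in place, B does not.

-- ===== PORT A =====
-- q[i][j] read: Python indexing with negative wrap (pyGetD; in range under Pre_)
def pyGet2 (g : List (List Int)) (i j : Int) : Int :=
  PySem.List.pyGetD (PySem.List.pyGetD g i []) j 0

def pySet2 (g : List (List Int)) (i j : Int) (v : Int) : List (List Int) :=
  PySem.List.pySetD g i (PySem.List.pySetD (PySem.List.pyGetD g i []) j v)

def pvShiftRow (q : List (List Int)) : List (List Int) :=
  match q.getLast? with
  | some last => last :: q.dropLast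
  | none => q

def pvRotateLoop (row column : Int) : Nat → List (List Int) → Int → Int → Int → List (List Int)
  | 0, q, _, _, _ => q
  | count+1, q, i, j, prev =>
    let temp := pyGet2 q i j
    let q' := pySet2 q i j prev
    if i = 0 ∧ j < column - 1 then pvRotateLoop row column count q' i (j+1) temp
    else if j = column - 1 ∧ i < row - 1 then pvRotateLoop row column count q' (i+1) j temp
    else if i = row - 1 ∧ j > 0 then pvRotateLoop row column count q' i (j-1) temp
    else pvRotateLoop row column count q' (i-1) j temp

def pvRotateA (row column : Int) (q : List (List Int)) : List (List Int) :=
  pvRotateLoop row column (row * 2 + (column - 2) * 2).toNat q 0 1 (pyGet2 q 0 0)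

def solution (rc : List (List Int)) (operations : List String) : List (List Int) :=
  let row : Int := rc.length
  let column : Int := (rc.headD []).length     -- len(rc[0]); rc ≠ [] under Pre_
  operations.foldl (fun q op =>
    if op = "Rotate" then pvRotateA row column q
    else if op = "ShiftRow" then pvShiftRow q
    else q) rc

-- ===== PORT B =====
def pvCells (row column : Int) : List (Int × Int) :=
  (PySem.List.pyRange 0 column 1).map (fun j => ((0:Int), j))
  ++ (PySem.List.pyRange 1 row 1).map (fun i => (i, column - 1))
  ++ (PySem.List.pyRange (column - 2) (-1) (-1)).map (fun j => (row - 1, j))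
  ++ (PySem.List.pyRange (row - 2) 0 (-1)).map (fun i => (i, (0:Int)))

def pvWriteBack (g : List (List Int)) (pvs : List ((Int × Int) × Int)) : List (List Int) :=
  pvs.foldl (fun g pv => pySet2 g pv.1.1 pv.1.2 pv.2) g

def pvRotateB (cells : List (Int × Int)) (g : List (List Int)) : List (List Int) :=
  let vals := cells.map (fun p => pyGet2 g p.1 p.2)
  let vals' := (match vals.getLast? with | some v => [v] | none => []) ++ vals.dropLast
  pvWriteBack g (cells.zip vals')

def solution_alt (rc : List (List Int)) (operations : List String) : List (List Int) :=
  let row : Int := rc.length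
  let column : Int := (rc.headD []).length
  let cells := pvCells row column
  operations.foldl (fun g op =>
    if op = "Rotate" then pvRotateB cells g
    else if op = "ShiftRow" then
      (match g.getLast? with | some last => [last] | none => []) ++ g.dropLast   -- grid.appendleft(grid.pop())
    else g) rc

-- ===== PRECONDITION & SPEC =====
-- Pre_ excludes [] (A raises IndexError on len(rc[0])) and, when a "Rotate" occurs, degenerate
-- grids: fewer than 2 rows, fewer than 2 columns, or a row shorter than the first row (there A's
-- border walk raises IndexError, or — on a single-row grid — double-writes cells, a value that is
-- as accidental as any other; B's differs there).
def Pre_solution (rc : List (List Int)) (operations : List String) : Prop :=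
  rc ≠ [] ∧ ("Rotate" ∈ operations →
    2 ≤ rc.length ∧ 2 ≤ (rc.headD []).length ∧ ∀ r ∈ rc, (rc.headD []).length ≤ r.length)
instance (rc : List (List Int)) (operations : List String) : Decidable (Pre_solution rc operations) := by
  unfold Pre_solution; infer_instance

def pvWitness_solution : List (List Int) × List String :=
  ([[1, 2], [3, 4]], ["Rotate", "ShiftRow", "Rotate"])

def Spec_solution (rc : List (List Int)) (operations : List String) (out : List (List Int)) : Prop := out = solution_alt rc operations
instance (rc : List (List Int)) (operations : List String) (out : List (List Int)) : Decidable (Spec_solution rc operations out) := by unfold Spec_solution; infer_instance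

-- ===== CLAIM (what is proved, stated in full; the proofs are below) =====
def Claim_equal_solution : Prop := ∀ (rc : List (List Int)) (operations : List String), Dom_solution rc operations → Pre_solution rc operations → Spec_solution rc operations (solution rc operations)

-- ===== LEMMAS AND PROOFS =====

def pvIn (n c : Nat) (p : Int × Int) : Prop :=
  0 ≤ p.1 ∧ p.1 < (n : Int) ∧ 0 ≤ p.2 ∧ p.2 < (c : Int)

def pvShape (n c : Nat) (g : List (List Int)) : Prop :=
  g.length = n ∧ ∀ r ∈ g, c ≤ r.length

theorem pyGet2_nn (g : List (List Int)) {i j : Int} (hi : 0 ≤ i) (hj : 0 ≤ j) :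
    pyGet2 g i j = (g.getD i.toNat []).getD j.toNat 0 := by
  rw [pyGet2, PySem.List.pyGetD_of_nonneg g [] hi, PySem.List.pyGetD_of_nonneg _ 0 hj]

theorem pySet2_nn (g : List (List Int)) {i j : Int} (v : Int) (hi : 0 ≤ i) (hj : 0 ≤ j) :
    pySet2 g i j v = g.set i.toNat ((g.getD i.toNat []).set j.toNat v) := by
  rw [pySet2, PySem.List.pyGetD_of_nonneg g [] hi, PySem.List.pySetD_of_nonneg _ v hj,
      PySem.List.pySetD_of_nonneg _ _ hi]

theorem shape_set2 {n c : Nat} {g : List (List Int)} (h : pvShape n c g)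
    {p : Int × Int} (hp : pvIn n c p) (v : Int) :
    pvShape n c (pySet2 g p.1 p.2 v) := by
  obtain ⟨h1, h2⟩ := h
  obtain ⟨a1, a2, a3, a4⟩ := hp
  rw [pySet2_nn g v a1 a3]
  have hlt : p.1.toNat < g.length := by omega
  refine ⟨by simpa using h1, ?_⟩
  intro r hr
  rcases List.mem_or_eq_of_mem_set hr with h' | h'
  · exact h2 r h'
  · subst h'
    rw [List.length_set, List.getD_eq_getElem g [] hlt]
    exact h2 _ (List.getElem_mem hlt)

theorem getD_set_self' {α : Type} (l : List α) (k : Nat) (a d : α) (h : k < l.length) :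
    (l.set k a).getD k d = a := by
  simp [List.getD_eq_getElem?_getD, h]

theorem getD_set_ne' {α : Type} (l : List α) {k m : Nat} (a d : α) (h : k ≠ m) :
    (l.set k a).getD m d = l.getD m d := by
  simp [List.getD_eq_getElem?_getD, List.getElem?_set_ne h]

theorem toNat_ne {p q : Int × Int} (a1 : 0 ≤ p.1) (a3 : 0 ≤ p.2) (b1 : 0 ≤ q.1) (b3 : 0 ≤ q.2)
    (hne : p ≠ q) (h1 : p.1.toNat = q.1.toNat) : p.2.toNat ≠ q.2.toNat := by
  intro hc; apply hne; apply Prod.ext <;> omega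

theorem get2_set2_ne {n c : Nat} {g : List (List Int)} (h : pvShape n c g)
    {p q : Int × Int} (hp : pvIn n c p) (hq : pvIn n c q) (hne : p ≠ q) (v : Int) :
    pyGet2 (pySet2 g q.1 q.2 v) p.1 p.2 = pyGet2 g p.1 p.2 := by
  obtain ⟨h1, h2⟩ := h
  obtain ⟨a1, a2, a3, a4⟩ := hp
  obtain ⟨b1, b2, b3, b4⟩ := hq
  rw [pySet2_nn g v b1 b3, pyGet2_nn _ a1 a3, pyGet2_nn g a1 a3]
  have hq1 : q.1.toNat < g.length := by omega
  by_cases hij : p.1.toNat = q.1.toNat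
  · rw [hij, getD_set_self' g q.1.toNat _ [] hq1,
        getD_set_ne' _ _ 0 (Ne.symm (toNat_ne a1 a3 b1 b3 hne hij))]
  · rw [getD_set_ne' g _ [] (Ne.symm hij)]

theorem set2_comm {n c : Nat} {g : List (List Int)} (h : pvShape n c g)
    {p q : Int × Int} (hp : pvIn n c p) (hq : pvIn n c q) (hne : p ≠ q) (v w : Int) :
    pySet2 (pySet2 g p.1 p.2 v) q.1 q.2 w = pySet2 (pySet2 g q.1 q.2 w) p.1 p.2 v := by
  obtain ⟨h1, h2⟩ := h
  obtain ⟨a1, a2, a3, a4⟩ := hp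
  obtain ⟨b1, b2, b3, b4⟩ := hq
  have hp1 : p.1.toNat < g.length := by omega
  have hq1 : q.1.toNat < g.length := by omega
  rw [pySet2_nn g v a1 a3, pySet2_nn g w b1 b3,
      pySet2_nn _ w b1 b3, pySet2_nn _ v a1 a3]
  by_cases hij : p.1.toNat = q.1.toNat
  · have hjj := toNat_ne a1 a3 b1 b3 hne hij
    rw [hij, getD_set_self' g q.1.toNat _ [] hq1, getD_set_self' g q.1.toNat _ [] hq1,
        List.set_set, List.set_set, List.set_comm _ _ hjj]
  · rw [getD_set_ne' g _ [] hij, getD_set_ne' g _ [] (Ne.symm hij),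
        List.set_comm _ _ hij]

def pvMkPath (row column : Int) : Nat → Int → Int → List (Int × Int)
  | 0, _, _ => []
  | count+1, i, j => (i, j) ::
    (if i = 0 ∧ j < column - 1 then pvMkPath row column count i (j+1)
     else if j = column - 1 ∧ i < row - 1 then pvMkPath row column count (i+1) j
     else if i = row - 1 ∧ j > 0 then pvMkPath row column count i (j-1)
     else pvMkPath row column count (i-1) j)

def pvSpecLoop : List (List Int) → List (Int × Int) → Int → List (List Int)
  | g, [], _ => g
  | g, p :: ps, prev => pvSpecLoop (pySet2 g p.1 p.2 prev) ps (pyGet2 g p.1 p.2)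

theorem rotateLoop_eq_specLoop (row column : Int) :
    ∀ (count : Nat) (g : List (List Int)) (i j prev : Int),
    pvRotateLoop row column count g i j prev
      = pvSpecLoop g (pvMkPath row column count i j) prev := by
  intro count
  induction count with
  | zero => intro g i j prev; rfl
  | succ k ih =>
    intro g i j prev
    rw [pvRotateLoop, pvMkPath]
    split_ifs <;> simp only [pvSpecLoop, ih]

theorem specLoop_eq_writeBack {n c : Nat} :
    ∀ (ps : List (Int × Int)) (g : List (List Int)) (prev : Int),
    pvShape n c g → (∀ p ∈ ps, pvIn n c p) → ps.Pairwise (· ≠ ·) →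
    pvSpecLoop g ps prev = pvWriteBack g (ps.zip (prev :: ps.map (fun p => pyGet2 g p.1 p.2))) := by
  intro ps
  induction ps with
  | nil => intro g prev _ _ _; rfl
  | cons p ps ih =>
    intro g prev hsh hin hpw
    have hp := hin p (List.mem_cons_self ..)
    have hin' : ∀ q ∈ ps, pvIn n c q := fun q hq => hin q (List.mem_cons_of_mem _ hq)
    have hpw' := (List.pairwise_cons.mp hpw).2
    have hnp : ∀ q ∈ ps, p ≠ q := (List.pairwise_cons.mp hpw).1
    rw [pvSpecLoop, List.zip_cons_cons, pvWriteBack]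
    simp only [List.foldl_cons]
    rw [ih (pySet2 g p.1 p.2 prev) (pyGet2 g p.1 p.2) (shape_set2 hsh hp prev) hin' hpw']
    have hmap : ps.map (fun q => pyGet2 (pySet2 g p.1 p.2 prev) q.1 q.2)
        = ps.map (fun q => pyGet2 g q.1 q.2) := by
      apply List.map_congr_left
      intro q hq
      exact get2_set2_ne hsh (hin' q hq) hp (fun h => hnp q hq h.symm) prev
    rw [pvWriteBack, hmap]
    simp only [List.map_cons]

theorem writeBack_cons_comm {n c : Nat} :
    ∀ (l : List ((Int × Int) × Int)) (g : List (List Int)) (x : (Int × Int) × Int),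
    pvShape n c g → pvIn n c x.1 → (∀ pv ∈ l, pvIn n c pv.1) → (∀ pv ∈ l, pv.1 ≠ x.1) →
    pvWriteBack (pySet2 g x.1.1 x.1.2 x.2) l = pySet2 (pvWriteBack g l) x.1.1 x.1.2 x.2 := by
  intro l
  induction l with
  | nil => intro g x _ _ _ _; rfl
  | cons pv l ih =>
    intro g x hsh hx hin hne
    have hpv := hin pv (List.mem_cons_self ..)
    simp only [pvWriteBack, List.foldl_cons] at *
    rw [set2_comm hsh hx hpv (Ne.symm (hne pv (List.mem_cons_self ..))) x.2 pv.2]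
    exact ih _ x (shape_set2 hsh hpv pv.2) hx
      (fun q hq => hin q (List.mem_cons_of_mem _ hq))
      (fun q hq => hne q (List.mem_cons_of_mem _ hq))

theorem writeBack_rotate {n c : Nat} {g : List (List Int)} (h : pvShape n c g)
    (x : (Int × Int) × Int) (l : List ((Int × Int) × Int))
    (hx : pvIn n c x.1) (hl : ∀ pv ∈ l, pvIn n c pv.1) (hne : ∀ pv ∈ l, pv.1 ≠ x.1) :
    pvWriteBack g (l ++ [x]) = pvWriteBack g (x :: l) := by
  have h1 : pvWriteBack g (l ++ [x]) = pySet2 (pvWriteBack g l) x.1.1 x.1.2 x.2 := by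
    simp [pvWriteBack]
  rw [h1]
  show _ = pvWriteBack (pySet2 g x.1.1 x.1.2 x.2) l
  rw [writeBack_cons_comm l g x h hx hl hne]

theorem seg_top {n c : Nat} (hn : 2 ≤ n) (hc : 2 ≤ c) :
    ∀ (d rest : Nat), d + 2 ≤ c →
    pvMkPath (n : Int) (c : Int) (rest + d + 1) 0 ((c:Int) - 1 - (d:Int))
      = (List.range (d+1)).map (fun (t : Nat) => ((0:Int), (c:Int) - 1 - (d:Int) + (t:Int)))
        ++ pvMkPath (n : Int) (c : Int) rest 1 ((c:Int) - 1) := by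
  intro d
  induction d with
  | zero =>
    intro rest hd
    rw [pvMkPath, if_neg (by omega), if_pos (by omega)]
    push_cast
    norm_num
  | succ d ih =>
    intro rest hd
    rw [pvMkPath, if_pos (by omega)]
    rw [show ((d+1 : Nat) : Int) = (d:Int) + 1 by push_cast; ring,
        show (c:Int) - 1 - ((d:Int)+1) + 1 = (c:Int) - 1 - (d:Int) by ring]
    rw [← Nat.add_assoc, ih rest (by omega)]
    rw [← List.cons_append]
    congr 1
    have hr : List.range (d+1+1) = 0 :: (List.range (d+1)).map Nat.succ :=
      List.range_succ_eq_map
    rw [hr, List.map_cons, List.map_map]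
    congr 1
    all_goals first
      | (norm_num; done)
      | (apply List.map_congr_left; intro t _;
         simp only [Function.comp_apply, Prod.mk.injEq, true_and, and_true];
         push_cast; ring)

theorem seg_right {n c : Nat} (hn : 2 ≤ n) (hc : 2 ≤ c) :
    ∀ (d rest : Nat), d + 2 ≤ n →
    pvMkPath (n : Int) (c : Int) (rest + d + 1) ((n:Int) - 1 - (d:Int)) ((c:Int) - 1)
      = (List.range (d+1)).map (fun (t : Nat) => ((n:Int) - 1 - (d:Int) + (t:Int), (c:Int) - 1))
        ++ pvMkPath (n : Int) (c : Int) rest ((n:Int) - 1) ((c:Int) - 2) := by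
  intro d
  induction d with
  | zero =>
    intro rest hd
    rw [pvMkPath, if_neg (by omega), if_neg (by omega), if_pos (by omega),
        show (c:Int) - 1 - 1 = (c:Int) - 2 by ring]
    push_cast
    norm_num
  | succ d ih =>
    intro rest hd
    rw [pvMkPath, if_neg (by omega), if_pos (by omega)]
    rw [show ((d+1 : Nat) : Int) = (d:Int) + 1 by push_cast; ring,
        show (n:Int) - 1 - ((d:Int)+1) + 1 = (n:Int) - 1 - (d:Int) by ring]
    rw [← Nat.add_assoc, ih rest (by omega)]
    rw [← List.cons_append]
    congr 1
    have hr : List.range (d+1+1) = 0 :: (List.range (d+1)).map Nat.succ :=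
      List.range_succ_eq_map
    rw [hr, List.map_cons, List.map_map]
    congr 1
    all_goals first
      | (norm_num; done)
      | (apply List.map_congr_left; intro t _;
         simp only [Function.comp_apply, Prod.mk.injEq, true_and, and_true];
         push_cast; ring)

theorem seg_bot {n c : Nat} (hn : 2 ≤ n) (hc : 2 ≤ c) :
    ∀ (d rest : Nat), d + 2 ≤ c →
    pvMkPath (n : Int) (c : Int) (rest + d + 1) ((n:Int) - 1) ((d:Int))
      = (List.range (d+1)).map (fun (t : Nat) => ((n:Int) - 1, (d:Int) - (t:Int)))
        ++ pvMkPath (n : Int) (c : Int) rest ((n:Int) - 2) 0 := by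
  intro d
  induction d with
  | zero =>
    intro rest hd
    rw [pvMkPath, if_neg (by omega), if_neg (by omega), if_neg (by omega),
        show (n:Int) - 1 - 1 = (n:Int) - 2 by ring]
    push_cast
    norm_num
  | succ d ih =>
    intro rest hd
    rw [pvMkPath, if_neg (by omega), if_neg (by omega), if_pos (by omega)]
    rw [show ((d+1 : Nat) : Int) = (d:Int) + 1 by push_cast; ring,
        show (d:Int) + 1 - 1 = (d:Int) by ring]
    rw [← Nat.add_assoc, ih rest (by omega)]
    rw [← List.cons_append]
    congr 1
    have hr : List.range (d+1+1) = 0 :: (List.range (d+1)).map Nat.succ :=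
      List.range_succ_eq_map
    rw [hr, List.map_cons, List.map_map]
    congr 1
    all_goals first
      | (norm_num; done)
      | (apply List.map_congr_left; intro t _;
         simp only [Function.comp_apply, Prod.mk.injEq, true_and, and_true];
         push_cast; ring)

theorem seg_left {n c : Nat} (hn : 2 ≤ n) (hc : 2 ≤ c) :
    ∀ (d : Nat), d + 2 ≤ n →
    pvMkPath (n : Int) (c : Int) (d + 1) ((d:Int)) 0
      = (List.range (d+1)).map (fun (t : Nat) => ((d:Int) - (t:Int), (0:Int))) := by
  intro d
  induction d with
  | zero =>
    intro hd
    rw [pvMkPath, if_pos (by omega)]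
    show ((0:Int), (0:Int)) :: pvMkPath (n : Int) (c : Int) 0 0 (0+1) = _
    rw [pvMkPath]
    push_cast
    simp
  | succ d ih =>
    intro hd
    rw [pvMkPath, if_neg (by omega), if_neg (by omega), if_neg (by omega)]
    rw [show ((d+1 : Nat) : Int) = (d:Int) + 1 by push_cast; ring,
        show (d:Int) + 1 - 1 = (d:Int) by ring]
    rw [ih (by omega)]
    have hr : List.range (d+1+1) = 0 :: (List.range (d+1)).map Nat.succ :=
      List.range_succ_eq_map
    rw [hr, List.map_cons, List.map_map]
    congr 1
    all_goals first
      | (norm_num; done)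
      | (apply List.map_congr_left; intro t _;
         simp only [Function.comp_apply, Prod.mk.injEq, true_and, and_true];
         push_cast; ring)

theorem mkPath_full {n c : Nat} (hn : 2 ≤ n) (hc : 2 ≤ c) :
    pvMkPath (n : Int) (c : Int) (2*n + 2*c - 4) 0 1
      = (List.range (c-1)).map (fun (t : Nat) => ((0:Int), 1 + (t:Int)))
        ++ ((List.range (n-1)).map (fun (t : Nat) => (1 + (t:Int), (c:Int) - 1))
        ++ ((List.range (c-1)).map (fun (t : Nat) => ((n:Int) - 1, (c:Int) - 2 - (t:Int)))
        ++ (List.range (n-1)).map (fun (t : Nat) => ((n:Int) - 2 - (t:Int), (0:Int))))) := by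
  have h4 := seg_left hn hc (n-2) (by omega)
  rw [show ((n-2:Nat):Int) = (n:Int)-2 by omega, show n-2+1 = n-1 by omega] at h4
  have h3 := seg_bot hn hc (c-2) (n-1) (by omega)
  rw [show ((c-2:Nat):Int) = (c:Int)-2 by omega] at h3
  rw [h4] at h3
  have h2 := seg_right hn hc (n-2) ((n-1)+(c-2)+1) (by omega)
  rw [show ((n-2:Nat):Int) = (n:Int)-2 by omega,
      show (n:Int)-1-((n:Int)-2) = 1 by ring] at h2
  rw [h3] at h2
  have h1 := seg_top hn hc (c-2) (((n-1)+(c-2)+1)+(n-2)+1) (by omega)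
  rw [show ((c-2:Nat):Int) = (c:Int)-2 by omega,
      show (c:Int)-1-((c:Int)-2) = 1 by ring] at h1
  rw [h2] at h1
  rw [show (2*n+2*c-4) = ((((n-1)+(c-2)+1)+(n-2)+1)+(c-2)+1) by omega, h1]
  simp only [show c-2+1 = c-1 by omega, show n-2+1 = n-1 by omega]

-- ===== cells list =====

def pvL (n c : Nat) : List (Int × Int) :=
  (List.range (c-1)).map (fun (t : Nat) => ((0:Int), 1 + (t:Int)))
  ++ ((List.range (n-1)).map (fun (t : Nat) => (1 + (t:Int), (c:Int) - 1))
  ++ ((List.range (c-1)).map (fun (t : Nat) => ((n:Int) - 1, (c:Int) - 2 - (t:Int)))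
  ++ (List.range (n-2)).map (fun (t : Nat) => ((n:Int) - 2 - (t:Int), (0:Int)))))

theorem map_range_pair_congr (f g : Nat → Int × Int) (m : Nat)
    (h1 : ∀ t, t < m → (f t).1 = (g t).1) (h2 : ∀ t, t < m → (f t).2 = (g t).2) :
    (List.range m).map f = (List.range m).map g := by
  apply List.map_congr_left
  intro t ht
  rw [List.mem_range] at ht
  exact Prod.ext (h1 t ht) (h2 t ht)

theorem cells_eq {n c : Nat} (hn : 2 ≤ n) (hc : 2 ≤ c) :
    pvCells (n : Int) (c : Int) = ((0:Int), (0:Int)) :: pvL n c := by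
  unfold pvCells pvL
  rw [PySem.List.pyRange_one, PySem.List.pyRange_one,
      PySem.List.pyRange_neg_one, PySem.List.pyRange_neg_one]
  rw [show ((n:Int) - 2 - 0).toNat = n - 2 by omega,
      show ((n:Int) - 1).toNat = n - 1 by omega,
      show ((c:Int) - 0).toNat = c by omega,
      show ((c:Int) - 2 - -1).toNat = c - 1 by omega]
  conv_lhs =>
    rw [show (List.range c) = 0 :: (List.range (c-1)).map Nat.succ from by
      rw [show c = c-1+1 by omega]; exact List.range_succ_eq_map]
  simp only [List.map_map, List.map_cons, List.cons_append, List.append_assoc]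
  congr 1
  all_goals try (norm_num [Function.comp]; done)
  all_goals repeat
    first
      | (apply map_range_pair_congr <;> (intro t ht; simp [Function.comp]; try push_cast; try omega))
      | congr 1

theorem path_eq_L_concat {n c : Nat} (hn : 2 ≤ n) (hc : 2 ≤ c) :
    pvMkPath (n : Int) (c : Int) (2*n + 2*c - 4) 0 1
      = pvL n c ++ [((0:Int), (0:Int))] := by
  rw [mkPath_full hn hc]
  unfold pvL
  rw [show n-1 = (n-2)+1 by omega]
  simp only [List.append_assoc]
  congr 3
  rw [List.range_succ, List.map_append]
  congr 1
  simp only [List.map_cons, List.map_nil]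
  congr 2 <;> omega

theorem mem_L_in {n c : Nat} (hn : 2 ≤ n) (hc : 2 ≤ c) :
    ∀ p ∈ pvL n c, pvIn n c p := by
  intro p hp
  unfold pvL at hp
  simp only [List.mem_append, List.mem_map, List.mem_range] at hp
  rcases hp with ⟨t, ht, rfl⟩ | ⟨t, ht, rfl⟩ | ⟨t, ht, rfl⟩ | ⟨t, ht, rfl⟩ <;>
    (unfold pvIn; refine ⟨?_, ?_, ?_, ?_⟩ <;> (dsimp only; omega))

theorem pairwise_map_range {α : Type} (f : Nat → α) (m : Nat)
    (h : ∀ a b, a < b → b < m → f a ≠ f b) :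
    ((List.range m).map f).Pairwise (· ≠ ·) := by
  rw [List.pairwise_map]
  apply List.Pairwise.imp_of_mem ?_ (List.pairwise_lt_range)
  intro a b _ hb hab
  exact h a b hab (List.mem_range.mp hb)

theorem L_ne_nil {n c : Nat} (hn : 2 ≤ n) (hc : 2 ≤ c) : pvL n c ≠ [] := by
  unfold pvL
  simp only [ne_eq, List.append_eq_nil_iff, List.map_eq_nil_iff, List.range_eq_nil]
  omega

theorem cells_pairwise {n c : Nat} (hn : 2 ≤ n) (hc : 2 ≤ c) :
    ((((0:Int), (0:Int)) :: pvL n c)).Pairwise (· ≠ ·) := by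
  rw [List.pairwise_cons]
  constructor
  · intro q hq
    unfold pvL at hq
    simp only [List.mem_append, List.mem_map, List.mem_range] at hq
    rcases hq with ⟨t, ht, rfl⟩ | ⟨t, ht, rfl⟩ | ⟨t, ht, rfl⟩ | ⟨t, ht, rfl⟩ <;>
      (simp only [ne_eq, Prod.mk.injEq, not_and]; omega)
  · unfold pvL
    refine (List.pairwise_append).mpr ⟨?_, (List.pairwise_append).mpr ⟨?_,
      (List.pairwise_append).mpr ⟨?_, ?_, ?_⟩, ?_⟩, ?_⟩
    · apply pairwise_map_range
      intro a b hab hbm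
      simp only [ne_eq, Prod.mk.injEq, not_and]
      omega
    · apply pairwise_map_range
      intro a b hab hbm
      simp only [ne_eq, Prod.mk.injEq, not_and]
      omega
    · apply pairwise_map_range
      intro a b hab hbm
      simp only [ne_eq, Prod.mk.injEq, not_and]
      omega
    · apply pairwise_map_range
      intro a b hab hbm
      simp only [ne_eq, Prod.mk.injEq, not_and]
      omega
    · intro p hp q hq
      simp only [List.mem_append, List.mem_map, List.mem_range] at hp hq
      obtain ⟨t, ht, rfl⟩ := hp
      obtain ⟨s, hs, rfl⟩ := hq
      simp only [ne_eq, Prod.mk.injEq, not_and]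
      omega
    · intro p hp q hq
      simp only [List.mem_append, List.mem_map, List.mem_range] at hp hq
      obtain ⟨t, ht, rfl⟩ := hp
      rcases hq with ⟨s, hs, rfl⟩ | ⟨s, hs, rfl⟩ <;>
        (simp only [ne_eq, Prod.mk.injEq, not_and]; omega)
    · intro p hp q hq
      simp only [List.mem_append, List.mem_map, List.mem_range] at hp hq
      obtain ⟨t, ht, rfl⟩ := hp
      rcases hq with ⟨s, hs, rfl⟩ | ⟨s, hs, rfl⟩ | ⟨s, hs, rfl⟩ <;>
        (simp only [ne_eq, Prod.mk.injEq, not_and]; omega)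

theorem rotate_eq {n c : Nat} (hn : 2 ≤ n) (hc : 2 ≤ c)
    {g : List (List Int)} (hsh : pvShape n c g) :
    pvRotateA (n:Int) (c:Int) g = pvRotateB (pvCells (n:Int) (c:Int)) g := by
  obtain hnil | ⟨M, z, hMz⟩ := List.eq_nil_or_concat (pvL n c)
  · exact absurd hnil (L_ne_nil hn hc)
  rw [List.concat_eq_append] at hMz
  have hina : pvIn n c (((0:Int),(0:Int))) := by unfold pvIn; dsimp only; omega
  have hinL : ∀ p ∈ M ++ [z], pvIn n c p := by
    rw [← hMz]; exact mem_L_in hn hc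
  have hpwC : ((((0:Int),(0:Int))) :: (M ++ [z])).Pairwise (· ≠ ·) := by
    rw [← hMz]; exact cells_pairwise hn hc
  have hnotin : ∀ p ∈ M ++ [z], p ≠ (((0:Int),(0:Int))) :=
    fun p hp => ((List.pairwise_cons.mp hpwC).1 p hp).symm
  have hpwL : (M ++ [z]).Pairwise (· ≠ ·) := (List.pairwise_cons.mp hpwC).2
  have hpwP : ((M ++ [z]) ++ [(((0:Int),(0:Int)))]).Pairwise (· ≠ ·) := by
    rw [List.pairwise_append]
    refine ⟨hpwL, List.pairwise_singleton _ _, ?_⟩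
    intro a ha b hb
    rw [List.mem_singleton.mp hb]
    exact hnotin a ha
  have hinP : ∀ p ∈ (M ++ [z]) ++ [(((0:Int),(0:Int)))], pvIn n c p := by
    intro p hp
    rcases List.mem_append.mp hp with h | h
    · exact hinL p h
    · rw [List.mem_singleton.mp h]; exact hina
  have hA : pvRotateA (n:Int) (c:Int) g
      = pvWriteBack g ((((((0:Int),(0:Int))), pyGet2 g z.1 z.2))
          :: (M ++ [z]).zip (pyGet2 g 0 0 :: M.map (fun p => pyGet2 g p.1 p.2))) := by
    unfold pvRotateA
    rw [show ((n:Int) * 2 + ((c:Int) - 2) * 2).toNat = 2*n + 2*c - 4 by omega,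
        rotateLoop_eq_specLoop, path_eq_L_concat hn hc, hMz,
        specLoop_eq_writeBack _ g _ hsh hinP hpwP]
    have hz : (((M ++ [z]) ++ [(((0:Int),(0:Int)))]).zip
          (pyGet2 g 0 0 :: ((M ++ [z]) ++ [(((0:Int),(0:Int)))]).map (fun p => pyGet2 g p.1 p.2)))
        = ((M ++ [z]).zip (pyGet2 g 0 0 :: M.map (fun p => pyGet2 g p.1 p.2)))
          ++ [(((((0:Int),(0:Int))), pyGet2 g z.1 z.2))] := by
      rw [List.map_append, List.map_append]
      simp only [List.map_cons, List.map_nil]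
      rw [show (pyGet2 g 0 0 :: ((List.map (fun p => pyGet2 g p.1 p.2) M
              ++ [pyGet2 g z.1 z.2]) ++ [pyGet2 g 0 0]))
            = ((pyGet2 g 0 0 :: List.map (fun p => pyGet2 g p.1 p.2) M)
              ++ ([pyGet2 g z.1 z.2] ++ [pyGet2 g 0 0]))
          from by simp [List.append_assoc]]
      rw [List.zip_append (by simp)]
      simp
    rw [hz, writeBack_rotate hsh _ _ hina
        (fun pv h => hinL _ (List.of_mem_zip h).1)
        (fun pv h => hnotin _ (List.of_mem_zip h).1)]
  have hB : pvRotateB (pvCells (n:Int) (c:Int)) g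
      = pvWriteBack g ((((((0:Int),(0:Int))), pyGet2 g z.1 z.2))
          :: (M ++ [z]).zip (pyGet2 g 0 0 :: M.map (fun p => pyGet2 g p.1 p.2))) := by
    unfold pvRotateB
    rw [cells_eq hn hc, hMz]
    simp only [List.map_cons, List.map_append, List.map_nil]
    rw [show ((pyGet2 g 0 0 :: (List.map (fun p => pyGet2 g p.1 p.2) M ++ [pyGet2 g z.1 z.2])))
          = ((pyGet2 g 0 0 :: List.map (fun p => pyGet2 g p.1 p.2) M) ++ [pyGet2 g z.1 z.2])
        from rfl]
    rw [List.getLast?_concat, List.dropLast_concat]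
    simp only [List.cons_append, List.nil_append]
    simp [List.zip_cons_cons]
  rw [hA, hB]

theorem shape_shift {n c : Nat} {g : List (List Int)} (h : pvShape n c g) :
    pvShape n c (pvShiftRow g) := by
  obtain ⟨h1, h2⟩ := h
  unfold pvShiftRow
  cases hg : g.getLast? with
  | none => exact ⟨h1, h2⟩
  | some last =>
    have hne : g ≠ [] := by
      intro hnil; rw [hnil] at hg; simp at hg
    have hpos : 0 < g.length := List.length_pos_iff.mpr hne
    constructor
    · simp only [List.length_cons, List.length_dropLast]
      omega
    · intro r hr
      rcases List.mem_cons.mp hr with rfl | hr'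
      · exact h2 _ (List.mem_of_getLast? hg)
      · exact h2 _ (List.mem_of_mem_dropLast hr')

theorem shape_writeBack {n c : Nat} :
    ∀ (l : List ((Int × Int) × Int)) (g : List (List Int)), pvShape n c g →
    (∀ pv ∈ l, pvIn n c pv.1) → pvShape n c (pvWriteBack g l) := by
  intro l
  induction l with
  | nil => intro g h _; exact h
  | cons pv l ih =>
    intro g h hin
    simp only [pvWriteBack, List.foldl_cons] at *
    exact ih _ (shape_set2 h (hin pv (List.mem_cons_self ..)) pv.2)
      (fun q hq => hin q (List.mem_cons_of_mem _ hq))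

theorem shape_rotateB {n c : Nat} (hn : 2 ≤ n) (hc : 2 ≤ c)
    {g : List (List Int)} (hsh : pvShape n c g) :
    pvShape n c (pvRotateB (pvCells (n:Int) (c:Int)) g) := by
  unfold pvRotateB
  apply shape_writeBack _ _ hsh
  intro pv hpv
  have hm := (List.of_mem_zip hpv).1
  rw [cells_eq hn hc] at hm
  rcases List.mem_cons.mp hm with h | h
  · rw [h]; unfold pvIn; dsimp only; omega
  · exact mem_L_in hn hc _ h

theorem shift_eq (q : List (List Int)) :
    pvShiftRow q = (match q.getLast? with | some last => [last] | none => []) ++ q.dropLast := by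
  unfold pvShiftRow
  cases hg : q.getLast? with
  | none =>
    have : q = [] := by
      cases q with
      | nil => rfl
      | cons a l => simp at hg
    rw [this]; rfl
  | some last => rfl

theorem fold_eq {n c : Nat} (hn : 2 ≤ n) (hc : 2 ≤ c) :
    ∀ (ops : List String) (g : List (List Int)), pvShape n c g →
    ops.foldl (fun q op => if op = "Rotate" then pvRotateA (n:Int) (c:Int) q
      else if op = "ShiftRow" then pvShiftRow q else q) g
    = ops.foldl (fun q op => if op = "Rotate" then pvRotateB (pvCells (n:Int) (c:Int)) q
      else if op = "ShiftRow" then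
        (match q.getLast? with | some last => [last] | none => []) ++ q.dropLast
      else q) g := by
  intro ops
  induction ops with
  | nil => intro g _; rfl
  | cons op ops ih =>
    intro g hsh
    simp only [List.foldl_cons]
    by_cases h1 : op = "Rotate"
    · rw [if_pos h1, if_pos h1, rotate_eq hn hc hsh]
      exact ih _ (shape_rotateB hn hc hsh)
    · by_cases h2 : op = "ShiftRow"
      · rw [if_neg h1, if_neg h1, if_pos h2, if_pos h2, ← shift_eq]
        exact ih _ (shape_shift hsh)
      · rw [if_neg h1, if_neg h1, if_neg h2, if_neg h2]
        exact ih _ hsh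

theorem fold_eq_noshape (R C : Int) (cells : List (Int × Int)) :
    ∀ (ops : List String) (g : List (List Int)), "Rotate" ∉ ops →
    ops.foldl (fun q op => if op = "Rotate" then pvRotateA R C q
      else if op = "ShiftRow" then pvShiftRow q else q) g
    = ops.foldl (fun q op => if op = "Rotate" then pvRotateB cells q
      else if op = "ShiftRow" then
        (match q.getLast? with | some last => [last] | none => []) ++ q.dropLast
      else q) g := by
  intro ops
  induction ops with
  | nil => intro g _; rfl
  | cons op ops ih =>
    intro g hmem
    have h1 : op ≠ "Rotate" := fun h => hmem (by rw [h]; exact List.mem_cons_self ..)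
    have hmem' : "Rotate" ∉ ops := fun h => hmem (List.mem_cons_of_mem _ h)
    simp only [List.foldl_cons, if_neg h1]
    by_cases h2 : op = "ShiftRow"
    · rw [if_pos h2, if_pos h2, ← shift_eq]
      exact ih _ hmem'
    · rw [if_neg h2, if_neg h2]
      exact ih _ hmem'

-- ===== VERDICT (by name: the statement is the Claim_ definition above) =====
theorem solution_spec : Claim_equal_solution := by
  intro rc operations hdom hpre
  unfold Spec_solution
  obtain ⟨hne, hrot⟩ := hpre
  unfold solution solution_alt
  by_cases hR : "Rotate" ∈ operations
  · obtain ⟨h2r, h2c, hrows⟩ := hrot hR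
    exact fold_eq h2r h2c operations rc ⟨rfl, hrows⟩
  · exact fold_eq_noshape _ _ _ operations rc hR
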